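-- pv_equiv track=rewrite | github.com/Sriamshreddy000/public-sentiment-analyzer | extract_post_entities.py | pick_two_entities
-- ===== SOURCE A (Python) =====
-- BLOCKLIST = {"ai", "god", "war", "world", "article", "monday", "wednesday"}
--
-- ALIASES = {
--     "U.S.": "US",
--     "U.S": "US",
--     "United States": "US",
--     "America": "US",
--     "US Navy": "US",
--     "U.S. Navy": "US",
--     "Iranian": "Iran",
-- }
--
-- def normalize(e: str) -> str:
--     e = (e or "").strip()
--     return ALIASES.get(e, e)
--
-- def pick_two_entities(entities):
--     # Prefer likely "actors" — geopolitics tends to be ORG/GPE not random phrases.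
--     # We already get GPE/ORG/PERSON from spaCy, but we filter more.
--
--     # extra junk filters
--     BAD_SUBSTRINGS = [
--         "thread", "day", "part", "workers", "summons", "missing", "million", "reuters",
--         "live", "update", "report", "claims", "sources", "officials"
--     ]
--
--     cleaned = []
--     for e in entities:
--         e2 = normalize(e)
--         if not e2:
--             continue
--
--         low = e2.lower()
--
--         if low in BLOCKLIST:
--             continue
--
--         # remove super long “entities”
--         if len(e2) > 25:
--             continue
--
--         # remove junky entities
--         if any(b in low for b in BAD_SUBSTRINGS):
--             continue
--
--         cleaned.append(e2)
--
--     # dedupe preserve order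
--     deduped = []
--     seen = set()
--     for e in cleaned:
--         k = e.lower()
--         if k in seen:
--             continue
--         seen.add(k)
--         deduped.append(e)
--
--     if len(deduped) >= 2:
--         return deduped[0], deduped[1]
--     if len(deduped) == 1:
--         return deduped[0], None
--     return None, None
-- ===== SOURCE B (Python) =====
-- BLOCKLIST = {"ai", "god", "war", "world", "article", "monday", "wednesday"}
--
-- ALIASES = {
--     "U.S.": "US",
--     "U.S": "US",
--     "United States": "US",
--     "America": "US",
--     "US Navy": "US",
--     "U.S. Navy": "US",
--     "Iranian": "Iran",
-- }
--
-- BAD_SUBSTRINGS = [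
--     "thread", "day", "part", "workers", "summons", "missing", "million", "reuters",
--     "live", "update", "report", "claims", "sources", "officials"
-- ]
--
-- def _keep(e):
--     # normalize + all junk filters; None if the entity is filtered out
--     e2 = (e or "").strip()
--     e2 = ALIASES.get(e2, e2)
--     low = e2.lower()
--     if not e2 or low in BLOCKLIST or len(e2) > 25 or any(b in low for b in BAD_SUBSTRINGS):
--         return None
--     return e2
--
-- def pick_two_entities(entities):
--     # Two successive linear searches instead of building filtered/deduped lists:
--     # find the first surviving entity, then the first later survivor whose
--     # lowercase differs from it.  With only two outputs needed, the dedupe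
--     # set degenerates to a single key comparison, so no list and no set are
--     # maintained and the scan stops at the second distinct survivor.
--     it = iter(entities)
--     for e in it:
--         first = _keep(e)
--         if first is not None:
--             k = first.lower()
--             for e2 in it:
--                 v = _keep(e2)
--                 if v is not None and v.lower() != k:
--                     return first, v
--             return first, None
--     return None, None
-- ===== Notes on version B (the rewrite author's own statement) =====
-- stated objective: faster
-- what changed: Instead of A's staged pipeline (build a filtered list, then a deduped list with a seen-set, then dispatch on its length), B runs two successive find-first searches over the input: locate the first surviving entity, then the first later survivor whose lowercase key differs from it; no intermediate list and no set are maintained, since with only two outputs the dedupe set degenerates to one key comparison, and the scan stops at the second distinct survivor.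
import Mathlib
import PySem

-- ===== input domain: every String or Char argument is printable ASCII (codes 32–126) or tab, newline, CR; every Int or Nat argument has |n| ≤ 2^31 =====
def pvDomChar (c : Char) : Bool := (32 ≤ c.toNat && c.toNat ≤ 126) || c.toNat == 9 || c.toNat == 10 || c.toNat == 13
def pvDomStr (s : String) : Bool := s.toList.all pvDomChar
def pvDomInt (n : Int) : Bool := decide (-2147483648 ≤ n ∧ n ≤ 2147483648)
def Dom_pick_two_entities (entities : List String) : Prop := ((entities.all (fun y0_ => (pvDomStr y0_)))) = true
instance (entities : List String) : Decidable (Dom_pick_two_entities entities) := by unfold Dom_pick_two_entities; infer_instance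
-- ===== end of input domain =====

-- B replaces A's staged pipeline (filtered list, then seen-set dedupe list, then length
-- dispatch) by two successive find-first searches with no intermediate list or set,
-- stopping at the second distinct survivor (a timing run measured B faster).

-- module-level constants shared by both Pythons
def pvBLOCKLIST : PySem.Set String :=
  PySem.Set.ofList ["ai", "god", "war", "world", "article", "monday", "wednesday"]

def pvALIASES : PySem.Dict String String :=
  PySem.Dict.mk [("U.S.", "US"), ("U.S", "US"), ("United States", "US"), ("America", "US"),
                 ("US Navy", "US"), ("U.S. Navy", "US"), ("Iranian", "Iran")]

def pvBAD_SUBSTRINGS : List String :=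
  ["thread", "day", "part", "workers", "summons", "missing", "million", "reuters",
   "live", "update", "report", "claims", "sources", "officials"]

-- ===== PORT A =====
-- normalize(e): strip, then alias lookup ('e or ""' is the identity on a str argument: '' stays '')
def pvNormalize (e : String) : String :=
  let e := PySem.Str.strip e
  pvALIASES.getD e e

def pick_two_entities (entities : List String) : Option String × Option String :=
  -- first loop: build `cleaned` with each `continue` guard in A's order
  let cleaned : List String := entities.foldl (fun cleaned e =>
    let e2 := pvNormalize e
    if e2 = "" then cleaned
    else
      let low := PySem.Str.lower e2
      if PySem.Set.contains pvBLOCKLIST low then cleaned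
      else if PySem.Str.len e2 > 25 then cleaned
      else if pvBAD_SUBSTRINGS.any (fun b => PySem.Str.isIn b low) then cleaned
      else cleaned ++ [e2]) []
  -- second loop: dedupe preserving order, seen keyed on e.lower()
  let ds : List String × PySem.Set String := cleaned.foldl (fun (p : List String × PySem.Set String) e =>
    let k := PySem.Str.lower e
    if PySem.Set.contains p.2 k then p
    else (p.1 ++ [e], PySem.Set.add p.2 k)) ([], PySem.Set.empty)
  let deduped := ds.1
  if deduped.length ≥ 2 then (PySem.List.pyGet? deduped 0, PySem.List.pyGet? deduped 1)
  else if deduped.length = 1 then (PySem.List.pyGet? deduped 0, none)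
  else (none, none)

-- ===== PORT B =====
-- Source B's helper _keep: normalize + all junk filters, None if filtered out
def bKeep? (e : String) : Option String :=
  let e2 := PySem.Str.strip e
  let e2 := pvALIASES.getD e2 e2
  let low := PySem.Str.lower e2
  if e2 = "" ∨ PySem.Set.contains pvBLOCKLIST low = true ∨ PySem.Str.len e2 > 25
      ∨ pvBAD_SUBSTRINGS.any (fun b => PySem.Str.isIn b low) = true then none
  else some e2

-- inner search: first later survivor whose lowercase differs from k
def bInner (k : String) : List String → Option String
  | [] => none
  | e :: rest =>
    match bKeep? e with
    | some v => if PySem.Str.lower v ≠ k then some v else bInner k rest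
    | none => bInner k rest

-- outer search: first survivor, then hand the remaining iterator to the inner search
def bOuter : List String → Option String × Option String
  | [] => (none, none)
  | e :: rest =>
    match bKeep? e with
    | some first => (some first, bInner (PySem.Str.lower first) rest)
    | none => bOuter rest

def pick_two_entities_alt (entities : List String) : Option String × Option String :=
  bOuter entities

-- ===== PRECONDITION & SPEC =====
def Spec_pick_two_entities (entities : List String) (out : Option String × Option String) : Prop := out = pick_two_entities_alt entities
instance (entities : List String) (out : Option String × Option String) : Decidable (Spec_pick_two_entities entities out) := by unfold Spec_pick_two_entities; infer_instance

-- ===== CLAIM (what is proved, stated in full; the proofs are below) =====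
def Claim_equal_pick_two_entities : Prop := ∀ (entities : List String), Dom_pick_two_entities entities → Spec_pick_two_entities entities (pick_two_entities entities)

-- ===== LEMMAS AND PROOFS =====

-- first element ≠ k in a list of survivors (proof-side mirror of bInner on the filtered list)
def firstDiff (k : String) : List String → Option String
  | [] => none
  | v :: t => if PySem.Str.lower v ≠ k then some v else firstDiff k t

-- A's filter step, expressed through bKeep?
theorem pvStepA_eq (acc : List String) (e : String) :
    (let e2 := pvNormalize e
     if e2 = "" then acc
     else
       let low := PySem.Str.lower e2
       if PySem.Set.contains pvBLOCKLIST low then acc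
       else if PySem.Str.len e2 > 25 then acc
       else if pvBAD_SUBSTRINGS.any (fun b => PySem.Str.isIn b low) then acc
       else acc ++ [e2]) =
    (match bKeep? e with | none => acc | some v => acc ++ [v]) := by
  simp only [bKeep?, pvNormalize]
  generalize pvALIASES.getD (PySem.Str.strip e) (PySem.Str.strip e) = x
  generalize PySem.Set.contains pvBLOCKLIST (PySem.Str.lower x) = c2
  generalize PySem.Str.len x = n
  generalize pvBAD_SUBSTRINGS.any (fun b => PySem.Str.isIn b (PySem.Str.lower x)) = c4
  split_ifs <;> first | rfl | tauto

-- A's first loop builds exactly the bKeep?-survivors, in order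
theorem pvCleaned_eq : ∀ (es acc : List String),
    es.foldl (fun cleaned e =>
      let e2 := pvNormalize e
      if e2 = "" then cleaned
      else
        let low := PySem.Str.lower e2
        if PySem.Set.contains pvBLOCKLIST low then cleaned
        else if PySem.Str.len e2 > 25 then cleaned
        else if pvBAD_SUBSTRINGS.any (fun b => PySem.Str.isIn b low) then cleaned
        else cleaned ++ [e2]) acc = acc ++ es.filterMap bKeep?
  | [], acc => by rw [List.foldl_nil, List.filterMap_nil, List.append_nil]
  | e :: rest, acc => by
    rw [List.foldl_cons, pvStepA_eq acc e, List.filterMap_cons]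
    cases h : bKeep? e with
    | none => exact (pvCleaned_eq rest acc).trans rfl
    | some v => exact (pvCleaned_eq rest (acc ++ [v])).trans (by simp)

-- A's dedupe step (defeq to the lambda in the port; named so lemmas can unfold it)
def ddStep (p : List String × PySem.Set String) (e : String) : List String × PySem.Set String :=
  let k := PySem.Str.lower e
  if PySem.Set.contains p.2 k then p else (p.1 ++ [e], PySem.Set.add p.2 k)

-- the dedupe fold only ever appends to the accumulated list
theorem pvDD_prefix : ∀ (xs : List String) (p : List String × PySem.Set String),
    ∃ t, (xs.foldl ddStep p).1 = p.1 ++ t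
  | [], p => ⟨[], by simp⟩
  | e :: rest, p => by
    rw [List.foldl_cons]
    by_cases h : PySem.Str.lower e ∈ p.2
    · rw [show ddStep p e = p from by simp [ddStep, h]]
      exact pvDD_prefix rest p
    · rw [show ddStep p e = (p.1 ++ [e], PySem.Set.add p.2 (PySem.Str.lower e)) from by
        simp [ddStep, h]]
      obtain ⟨t, ht⟩ := pvDD_prefix rest (p.1 ++ [e], PySem.Set.add p.2 (PySem.Str.lower e))
      exact ⟨e :: t, by simpa using ht⟩

-- with one element collected, the first two of the dedupe fold are it and firstDiff
theorem pvDD2 : ∀ (t : List String) (v k : String),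
    ((t.foldl ddStep ([v], PySem.Set.add PySem.Set.empty k)).1).take 2 =
    (match firstDiff k t with | none => [v] | some u => [v, u])
  | [], v, k => by simp [firstDiff]
  | e :: t', v, k => by
    rw [List.foldl_cons]
    by_cases h : PySem.Str.lower e = k
    · rw [show ddStep ([v], PySem.Set.add PySem.Set.empty k) e
            = ([v], PySem.Set.add PySem.Set.empty k) from by
        simp [ddStep, PySem.Set.contains, PySem.Set.add, PySem.Set.empty, h]]
      rw [pvDD2 t' v k]
      simp [firstDiff, h]
    · rw [show ddStep ([v], PySem.Set.add PySem.Set.empty k) e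
            = ([v] ++ [e], PySem.Set.add (PySem.Set.add PySem.Set.empty k) (PySem.Str.lower e)) from by
        simp [ddStep, PySem.Set.contains, PySem.Set.add, PySem.Set.empty, h]]
      obtain ⟨t, ht⟩ := pvDD_prefix t'
        ([v] ++ [e], PySem.Set.add (PySem.Set.add PySem.Set.empty k) (PySem.Str.lower e))
      rw [ht]
      simp [firstDiff, h]
  termination_by t => t.length

-- B's inner search over raw input = firstDiff over the survivors
theorem pvInner_eq : ∀ (es : List String) (k : String),
    bInner k es = firstDiff k (es.filterMap bKeep?)
  | [], k => rfl
  | e :: rest, k => by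
    rw [List.filterMap_cons]
    cases h : bKeep? e with
    | none => simp only [bInner, h]; exact pvInner_eq rest k
    | some v => simp only [bInner, h, firstDiff]; split <;> [rfl; exact pvInner_eq rest k]

-- B in terms of the survivor list
theorem pvOuter_eq : ∀ (es : List String),
    bOuter es = (match es.filterMap bKeep? with
      | [] => (none, none)
      | v :: t => (some v, firstDiff (PySem.Str.lower v) t))
  | [] => rfl
  | e :: rest => by
    rw [List.filterMap_cons]
    cases h : bKeep? e with
    | none => simp only [bOuter, h]; exact pvOuter_eq rest
    | some v => simp only [bOuter, h, pvInner_eq rest]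

-- A's final length dispatch, given the first two elements of the deduped list
theorem pvDispatch (d : List String) (v : String) (o : Option String)
    (h : d.take 2 = (match o with | none => [v] | some u => [v, u])) :
    (if d.length ≥ 2 then (PySem.List.pyGet? d 0, PySem.List.pyGet? d 1)
     else if d.length = 1 then (PySem.List.pyGet? d 0, none)
     else (none, none)) = (some v, o) := by
  cases d with
  | nil => cases o <;> simp at h
  | cons a d' =>
    cases d' with
    | nil =>
      cases o with
      | none =>
        have : a = v := by simpa using h
        subst this
        simp [PySem.List.pyGet?, PySem.List.pyIdx?]
      | some u => simp at h
    | cons b tl =>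
      cases o with
      | none => simp at h
      | some u =>
        have hav : a = v ∧ b = u := by simpa [List.take] using h
        obtain ⟨ha, hb⟩ := hav
        subst ha; subst hb
        have h2 : (2:Nat) ≤ (a :: b :: tl).length := by simp
        rw [if_pos h2]
        simp only [PySem.List.pyGet?, PySem.List.pyIdx?]
        norm_num
        rw [if_pos (by omega : (0:Int) ≤ (tl.length:Int) + 1)]
        simp

theorem pvFinal (entities : List String) :
    pick_two_entities entities = pick_two_entities_alt entities := by
  simp only [pick_two_entities, pick_two_entities_alt, pvOuter_eq]
  rw [pvCleaned_eq, List.nil_append]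
  cases hcs : entities.filterMap bKeep? with
  | nil => simp
  | cons v t =>
    show (let ds := List.foldl ddStep (ddStep ([], PySem.Set.empty) v) t
          let deduped := ds.1
          if deduped.length ≥ 2 then (PySem.List.pyGet? deduped 0, PySem.List.pyGet? deduped 1)
          else if deduped.length = 1 then (PySem.List.pyGet? deduped 0, none)
          else (none, none)) = (some v, firstDiff (PySem.Str.lower v) t)
    rw [show ddStep ([], PySem.Set.empty) v
          = ([v], PySem.Set.add PySem.Set.empty (PySem.Str.lower v)) from by
      simp [ddStep, PySem.Set.contains, PySem.Set.empty, PySem.Set.add]]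
    exact pvDispatch _ v _ (pvDD2 t v (PySem.Str.lower v))

-- ===== VERDICT (by name: the statement is the Claim_ definition above) =====
theorem pick_two_entities_spec : Claim_equal_pick_two_entities := by
  intro entities _
  unfold Spec_pick_two_entities
  exact pvFinal entities
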